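-- pv_equiv track=rewrite | github.com/raiyan-2002/AoC-2024 | Day 4/parta.py | bfs
-- ===== SOURCE A (Python) =====
-- search = "XMAS"
--
-- def inRange(y, x, height, width):
--     return y >= 0 and y < height and x >= 0 and x < width
--
-- def bfs(y, x, grid, dy, dx):
--
--     height = len(grid)
--     width = len(grid[0])
--
--     for k in range(4):
--         if not inRange(y, x, height, width):
--             return 0
--         if grid[y][x] != search[k]:
--             return 0
--         y += dy
--         x += dx
--
--     return 1
-- ===== SOURCE B (Python) =====
-- search = "XMAS"
--
-- def inRange(y, x, height, width):
--     return y >= 0 and y < height and x >= 0 and x < width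
--
-- def bfs(y, x, grid, dy, dx):
--     height = len(grid)
--     width = len(grid[0])
--     coords = [(y + k * dy, x + k * dx) for k in range(4)]
--     if not all(inRange(Y, X, height, width) for Y, X in coords):
--         return 0
--     s = ''.join(grid[Y][X] for Y, X in coords)
--     return 1 if s == search else 0
-- ===== Notes on version B (the rewrite author's own statement) =====
-- stated objective: alternative
-- what changed: Replaces A's single interleaved walk (bounds-check, char-compare, step, repeated 4 times) by separate phases: generate the four coordinates in closed form (y+k*dy, x+k*dx), validate all bounds at once, then extract the 4-character string and compare it whole against 'XMAS'.
-- outside the precondition, e.g. on bfs(0, 0, [], 0, 0): A raises IndexError, B raises IndexError; on bfs(0, 1, ['AB', 'CD', 'E', 'FG'], 1, 0): A returns 0, B raises IndexError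
import Mathlib
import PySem

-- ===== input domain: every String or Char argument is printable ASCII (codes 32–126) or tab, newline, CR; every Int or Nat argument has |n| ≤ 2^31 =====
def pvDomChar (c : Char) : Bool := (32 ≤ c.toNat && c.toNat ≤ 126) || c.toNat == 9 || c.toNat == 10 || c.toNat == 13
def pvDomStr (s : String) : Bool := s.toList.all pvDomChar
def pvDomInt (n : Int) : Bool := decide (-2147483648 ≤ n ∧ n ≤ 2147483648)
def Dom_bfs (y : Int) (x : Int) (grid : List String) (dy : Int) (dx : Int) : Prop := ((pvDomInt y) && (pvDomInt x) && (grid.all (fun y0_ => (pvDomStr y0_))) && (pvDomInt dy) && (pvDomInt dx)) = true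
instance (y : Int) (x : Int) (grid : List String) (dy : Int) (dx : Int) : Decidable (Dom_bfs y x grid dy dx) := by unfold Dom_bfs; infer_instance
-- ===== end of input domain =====

-- B separates A's interleaved walk into phases: generate the four coordinates in closed
-- form, bounds-check them all, then extract the 4-char string and compare it whole
-- against "XMAS" (objective: alternative decomposition, same cost).

-- ===== PORT A =====
def pvSearch : String := "XMAS"

def pvInRange (y x height width : Int) : Bool :=
  decide (0 ≤ y) && decide (y < height) && decide (0 ≤ x) && decide (x < width)

-- grid[y][x] as an Option (none exactly where Python raises IndexError)
def pvCharAt (grid : List String) (y x : Int) : Option Char :=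
  (PySem.List.pyGet? grid y).bind (fun row => PySem.Str.pyGet? row x)

-- the 'for k in range(4)' loop of A, fuel counting down (k = 3 - fuel)
def pvLoop (grid : List String) (dy dx h w : Int) : Nat → Int → Int → Int
  | 0, _, _ => 1
  | Nat.succ fuel, y, x =>
    if pvInRange y x h w = false then 0
    else if pvCharAt grid y x ≠ PySem.Str.pyGet? pvSearch (3 - (fuel : Int)) then 0
    else pvLoop grid dy dx h w fuel (y + dy) (x + dx)

def bfs (y : Int) (x : Int) (grid : List String) (dy : Int) (dx : Int) : Int :=
  let height : Int := PySem.List.len grid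
  let width : Int := PySem.Str.len ((PySem.List.pyGet? grid 0).getD "")
  pvLoop grid dy dx height width 4 y x

-- ===== PORT B =====
def bfs_alt (y : Int) (x : Int) (grid : List String) (dy : Int) (dx : Int) : Int :=
  let height : Int := PySem.List.len grid
  let width : Int := PySem.Str.len ((PySem.List.pyGet? grid 0).getD "")
  let coords : List (Int × Int) :=
    (List.range 4).map (fun k => (y + (k : Int) * dy, x + (k : Int) * dx))
  if coords.all (fun p => pvInRange p.1 p.2 height width) then
    let s : List Char := coords.map (fun p => (pvCharAt grid p.1 p.2).getD ' ')
    if s = pvSearch.toList then 1 else 0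
  else 0

-- ===== PRECONDITION & SPEC =====
-- Pre_ excludes the empty grid (len(grid[0]) raises IndexError) and walks on ragged
-- grids whose in-range steps reach past the end of a short row, where grid[y][x]
-- raises IndexError (in A only if every earlier character matched; B probes all four).
def Pre_bfs (y : Int) (x : Int) (grid : List String) (dy : Int) (dx : Int) : Prop :=
  grid ≠ [] ∧ ∀ k : Nat, k < 4 →
    pvInRange (y + k * dy) (x + k * dx) (PySem.List.len grid)
      (PySem.Str.len (grid.headD "")) = true →
    x + (k : Int) * dx < PySem.Str.len ((PySem.List.pyGet? grid (y + k * dy)).getD "")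
instance (y : Int) (x : Int) (grid : List String) (dy : Int) (dx : Int) : Decidable (Pre_bfs y x grid dy dx) := by unfold Pre_bfs; infer_instance

def pvWitness_bfs : Int × Int × List String × Int × Int := (0, 0, ["XM", "AS"], 1, 1)

def Spec_bfs (y : Int) (x : Int) (grid : List String) (dy : Int) (dx : Int) (out : Int) : Prop := out = bfs_alt y x grid dy dx
instance (y : Int) (x : Int) (grid : List String) (dy : Int) (dx : Int) (out : Int) : Decidable (Spec_bfs y x grid dy dx out) := by unfold Spec_bfs; infer_instance

-- ===== CLAIM (what is proved, stated in full; the proofs are below) =====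
def Claim_equal_bfs : Prop := ∀ (y : Int) (x : Int) (grid : List String) (dy : Int) (dx : Int), Dom_bfs y x grid dy dx → Pre_bfs y x grid dy dx → Spec_bfs y x grid dy dx (bfs y x grid dy dx)

-- ===== LEMMAS AND PROOFS =====

-- An in-range position whose row is long enough has a character.
theorem pvCharAt_isSome (grid : List String) (w a b : Int)
    (h : pvInRange a b (PySem.List.len grid) w = true)
    (hlt : b < PySem.Str.len ((PySem.List.pyGet? grid a).getD "")) :
    ∃ c, pvCharAt grid a b = some c := by
  simp only [pvInRange, Bool.and_eq_true, decide_eq_true_eq] at h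
  obtain ⟨⟨⟨hy0, hy1⟩, hx0⟩, _⟩ := h
  simp only [PySem.List.len_eq] at hy1
  obtain ⟨row, hrow⟩ : ∃ r, PySem.List.pyGet? grid a = some r :=
    ⟨_, PySem.List.pyGet?_eq_some_getElem grid hy0 (by exact_mod_cast hy1)⟩
  rw [hrow] at hlt
  simp only [Option.getD_some, PySem.Str.len_eq] at hlt
  refine ⟨row.toList[b.toNat], ?_⟩
  simp [pvCharAt, hrow, PySem.Str.pyGet?_eq, PySem.Chars.pyGet?_eq_listPyGet?]
  exact PySem.List.pyGet?_eq_some_getElem row.toList hx0 (by exact_mod_cast hlt)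

-- ===== VERDICT (by name: the statement is the Claim_ definition above) =====
theorem bfs_spec : Claim_equal_bfs := by
  intro y x grid dy dx _hdom hpre
  obtain ⟨hne, hrect⟩ := hpre
  unfold Spec_bfs bfs bfs_alt
  set H : Int := PySem.List.len grid with hH
  set W : Int := PySem.Str.len ((PySem.List.pyGet? grid 0).getD "") with hW
  have hW' : PySem.Str.len (grid.headD "") = W := by
    cases grid with
    | nil => exact absurd rfl hne
    | cons a l => simp [hW]
  have hS : pvSearch.toList = ['X', 'M', 'A', 'S'] := by decide
  have hr : List.range 4 = [0, 1, 2, 3] := rfl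
  have e3y : (3 : Int) * dy = dy + (dy + dy) := by ring
  have e3x : (3 : Int) * dx = dx + (dx + dx) := by ring
  rw [hW'] at hrect
  have key : ∀ (a b : Int), pvInRange a b H W = true →
      b < PySem.Str.len ((PySem.List.pyGet? grid a).getD "") →
      ∃ c, pvCharAt grid a b = some c :=
    fun a b hab hlt => pvCharAt_isSome grid W a b hab hlt
  have P0 : pvInRange y x H W = true →
      x < PySem.Str.len ((PySem.List.pyGet? grid y).getD "") := by
    have h := hrect 0 (by norm_num); simpa using h
  have P1 : pvInRange (y + dy) (x + dx) H W = true →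
      x + dx < PySem.Str.len ((PySem.List.pyGet? grid (y + dy)).getD "") := by
    have h := hrect 1 (by norm_num); simpa using h
  have P2 : pvInRange (y + (dy + dy)) (x + (dx + dx)) H W = true →
      x + (dx + dx) < PySem.Str.len ((PySem.List.pyGet? grid (y + (dy + dy))).getD "") := by
    have h := hrect 2 (by norm_num); simpa [two_mul, add_assoc] using h
  have P3 : pvInRange (y + (dy + (dy + dy))) (x + (dx + (dx + dx))) H W = true →
      x + (dx + (dx + dx)) <
        PySem.Str.len ((PySem.List.pyGet? grid (y + (dy + (dy + dy)))).getD "") := by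
    have h := hrect 3 (by norm_num); simpa [e3y, e3x, add_assoc] using h
  by_cases h0 : pvInRange y x H W = true
  case neg => simp [pvLoop, hr, h0]
  obtain ⟨c0, hc0⟩ := key y x h0 (P0 h0)
  by_cases e0 : c0 = 'X'
  case neg =>
    simp [pvLoop, pvSearch, PySem.Str.pyGet?, hr, h0, hc0, e0, two_mul, e3y, e3x]
  by_cases h1 : pvInRange (y + dy) (x + dx) H W = true
  case neg =>
    simp [pvLoop, pvSearch, PySem.Str.pyGet?, hr, h0, hc0, e0, h1, two_mul, e3y, e3x]
  obtain ⟨c1, hc1⟩ := key (y + dy) (x + dx) h1 (P1 h1)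
  by_cases e1 : c1 = 'M'
  case neg =>
    simp [pvLoop, pvSearch, PySem.Str.pyGet?, hr, h0, hc0, e0, h1, hc1, e1, two_mul, e3y, e3x]
  by_cases h2 : pvInRange (y + (dy + dy)) (x + (dx + dx)) H W = true
  case neg =>
    simp [pvLoop, pvSearch, PySem.Str.pyGet?, hS, hr, h0, hc0, e0, h1, hc1, e1, h2, two_mul,
      add_assoc, e3y, e3x]
  obtain ⟨c2, hc2⟩ := key (y + (dy + dy)) (x + (dx + dx)) h2 (P2 h2)
  by_cases e2 : c2 = 'A'
  case neg =>
    simp [pvLoop, pvSearch, PySem.Str.pyGet?, hS, hr, h0, hc0, e0, h1, hc1, e1, h2, hc2, e2,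
      two_mul, add_assoc, e3y, e3x]
  by_cases h3 : pvInRange (y + (dy + (dy + dy))) (x + (dx + (dx + dx))) H W = true
  case neg =>
    simp [pvLoop, pvSearch, PySem.Str.pyGet?, hS, hr, h0, hc0, e0, h1, hc1, e1, h2, hc2, e2, h3,
      two_mul, add_assoc, e3y, e3x]
  obtain ⟨c3, hc3⟩ := key (y + (dy + (dy + dy))) (x + (dx + (dx + dx))) h3 (P3 h3)
  by_cases e3 : c3 = 'S'
  case neg =>
    simp [pvLoop, pvSearch, PySem.Str.pyGet?, hS, hr, h0, hc0, e0, h1, hc1, e1, h2, hc2, e2, h3,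
      hc3, e3, two_mul, add_assoc, e3y, e3x]
  simp [pvLoop, pvSearch, PySem.Str.pyGet?, hS, hr, h0, hc0, e0, h1, hc1, e1, h2, hc2, e2, h3,
    hc3, e3, two_mul, add_assoc, e3y, e3x]
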